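-- pv_equiv track=rewrite | github.com/ElchaabiMohamed/InferCode_SVM | Du-42487-python-files/program_34788.py | weird_case
-- ===== SOURCE A (Python) =====
-- def weird_case(some_str):
--    sen = ""
--    i = True
--    for letter in some_str:
--       if i:
--          sen += letter.upper()
--
--       else:
--          sen += letter.lower()
--
--       if letter != " ":
--          i = not i
--
--    return sen
-- ===== SOURCE B (Python) =====
-- def weird_case(some_str):
--     letters = [c for c in some_str if c != ' ']
--     toggled = [c.upper() if i % 2 == 0 else c.lower() for i, c in enumerate(letters)]
--     it = iter(toggled)
--     return ''.join(c if c == ' ' else next(it) for c in some_str)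
-- ===== Notes on version B (the rewrite author's own statement) =====
-- stated objective: alternative
-- what changed: Replaces A's single pass with a running boolean flag by filtering the non-space characters, casing each by the parity of its index in that filtered list, and a second interleaving pass that re-inserts spaces.
import Mathlib
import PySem

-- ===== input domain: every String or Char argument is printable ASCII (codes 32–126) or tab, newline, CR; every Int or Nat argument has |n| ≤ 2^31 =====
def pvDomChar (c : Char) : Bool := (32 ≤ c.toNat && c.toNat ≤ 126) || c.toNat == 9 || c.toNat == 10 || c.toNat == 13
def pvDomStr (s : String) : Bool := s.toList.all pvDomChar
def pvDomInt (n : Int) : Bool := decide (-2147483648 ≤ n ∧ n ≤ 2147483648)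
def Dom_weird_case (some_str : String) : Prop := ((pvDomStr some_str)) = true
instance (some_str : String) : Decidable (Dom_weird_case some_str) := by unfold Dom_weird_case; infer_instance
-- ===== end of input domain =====

-- B recomputes the same result by index-parity over the filtered non-space characters plus an
-- interleaving pass, instead of A's running boolean flag; objective: alternative decomposition.

-- ===== PORT A =====
def weird_case (some_str : String) : String :=
  String.mk ((some_str.toList.foldl
    (fun (st : List Char × Bool) letter =>
      let sen := st.1 ++ [if st.2 then PySem.Chars.upperChar letter else PySem.Chars.lowerChar letter]
      (sen, if letter ≠ ' ' then !st.2 else st.2))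
    ([], true)).1)

-- ===== PORT B =====
-- ''.join(c if c == ' ' else next(it) for c in some_str): consume the toggled stream left to right
def pvInterleave : List Char → List Char → List Char
  | [], _ => []
  | c :: rest, ts =>
      if c = ' ' then c :: pvInterleave rest ts
      else match ts with
        | [] => []          -- next(it) exhausted: unreachable, stream has one entry per non-space char
        | t :: ts' => t :: pvInterleave rest ts'

def weird_case_alt (some_str : String) : String :=
  let letters := some_str.toList.filter (fun c => c ≠ ' ')
  let toggled := (PySem.List.enumerate letters).map
    (fun p => if p.1 % 2 == 0 then PySem.Chars.upperChar p.2 else PySem.Chars.lowerChar p.2)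
  String.mk (pvInterleave some_str.toList toggled)

-- ===== PRECONDITION & SPEC =====
def Spec_weird_case (some_str : String) (out : String) : Prop := out = weird_case_alt some_str
instance (some_str : String) (out : String) : Decidable (Spec_weird_case some_str out) := by unfold Spec_weird_case; infer_instance

-- ===== CLAIM (what is proved, stated in full; the proofs are below) =====
def Claim_equal_weird_case : Prop := ∀ (some_str : String), Dom_weird_case some_str → Spec_weird_case some_str (weird_case some_str)

-- ===== LEMMAS AND PROOFS =====

def pvCaseCh (b : Bool) (c : Char) : Char :=
  if b then PySem.Chars.upperChar c else PySem.Chars.lowerChar c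

def pvToggleFrom : Bool → List Char → List Char
  | _, [] => []
  | b, c :: cs => pvCaseCh b c :: pvToggleFrom (!b) cs

theorem pvEnum_toggle (xs : List Char) : ∀ (s : Int), 0 ≤ s →
    (PySem.List.enumerate xs s).map
      (fun p => if p.1 % 2 == 0 then PySem.Chars.upperChar p.2 else PySem.Chars.lowerChar p.2)
    = pvToggleFrom (s % 2 == 0) xs := by
  induction xs with
  | nil => intro s _; simp [PySem.List.enumerate_nil, pvToggleFrom]
  | cons c cs ih =>
    intro s hs
    rw [PySem.List.enumerate_cons, List.map_cons, ih (s + 1) (by omega)]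
    have hpar : ((s + 1) % 2 == 0) = !(s % 2 == 0) := by
      rcases Int.emod_two_eq_zero_or_one s with h | h <;> simp [h] <;> omega
    simp [pvToggleFrom, pvCaseCh, hpar]

theorem pvFold_char (l : List Char) : ∀ (acc : List Char) (b : Bool),
    (l.foldl
      (fun (st : List Char × Bool) letter =>
        let sen := st.1 ++ [if st.2 then PySem.Chars.upperChar letter else PySem.Chars.lowerChar letter]
        (sen, if letter ≠ ' ' then !st.2 else st.2))
      (acc, b)).1
    = acc ++ pvInterleave l (pvToggleFrom b (l.filter (fun c => c ≠ ' '))) := by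
  induction l with
  | nil => intro acc b; simp [pvInterleave]
  | cons c cs ih =>
    intro acc b
    by_cases hc : c = ' '
    · subst hc
      simp only [List.foldl_cons, List.filter_cons]
      rw [ih]
      have : (if b then PySem.Chars.upperChar ' ' else PySem.Chars.lowerChar ' ') = ' ' := by
        cases b <;> decide
      simp [pvInterleave, this]
    · simp only [List.foldl_cons, List.filter_cons, if_pos hc]
      rw [ih]
      simp [pvInterleave, pvToggleFrom, pvCaseCh, hc]

-- ===== VERDICT (by name: the statement is the Claim_ definition above) =====
theorem weird_case_spec : Claim_equal_weird_case := by
  intro s _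
  show weird_case s = weird_case_alt s
  unfold weird_case weird_case_alt
  simp only [pvFold_char, List.nil_append]
  rw [pvEnum_toggle (s.toList.filter (fun c => c ≠ ' ')) 0 (le_refl 0)]
  rfl
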